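-- pv_equiv track=rewrite | github.com/PavlinGergov/CheckiO | Codeship/ghost_detect.py | recognize
-- ===== SOURCE A (Python) =====
-- def recognize(number):
--     is_true = False
--     binary_number = "{0:b}".format(number)
--     ones = (binary_number.replace("0", " ")).split()
--     for index,numb in enumerate(ones):
--         if index + 1 < len(ones):
--             if numb == ones[index+1]:
--                 is_true = True
--             else:
--                 is_true = False
--                 break
--         else:
--             break
--     if is_true:
--         return True
--     else:
--         return False
-- ===== SOURCE B (Python) =====
-- def recognize(number):
--     ones = "{0:b}".format(number).replace("0", " ").split()
--     return len(ones) >= 2 and len(set(ones)) == 1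
-- ===== Notes on version B (the rewrite author's own statement) =====
-- stated objective: simpler
-- what changed: Replaces the enumerate/index/lookahead/break loop and flag variable with a one-line aggregate test: build the set of run tokens once and check there are at least two tokens all distinct-equal (set cardinality 1).
import Mathlib
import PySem

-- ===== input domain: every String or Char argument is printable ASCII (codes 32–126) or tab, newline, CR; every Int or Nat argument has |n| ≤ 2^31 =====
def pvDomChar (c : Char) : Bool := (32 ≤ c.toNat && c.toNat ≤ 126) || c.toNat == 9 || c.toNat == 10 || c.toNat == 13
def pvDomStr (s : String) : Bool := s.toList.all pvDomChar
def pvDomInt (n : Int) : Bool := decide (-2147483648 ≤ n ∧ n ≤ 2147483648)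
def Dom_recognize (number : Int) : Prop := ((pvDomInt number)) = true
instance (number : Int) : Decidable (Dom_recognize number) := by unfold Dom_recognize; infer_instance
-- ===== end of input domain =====

-- B replaces A's enumerate/lookahead/break loop and flag with a one-shot aggregate test
-- (≥ 2 run tokens and exactly one distinct token); objective: simpler.


-- ===== PORT A =====
-- the for-loop over enumerate(ones) with lookahead ones[index+1] and break,
-- threading the is_true flag; the two `break` arms return the current flag
def recognizeLoop (ones : List String) (is_true : Bool) : Bool :=
  match ones with
  | [] => is_true
  | [_] => is_true                      -- index + 1 = len(ones): break
  | numb :: next :: rest =>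
      if numb == next then recognizeLoop (next :: rest) true
      else false                        -- is_true = False; break

def recognize (number : Int) : Bool :=
  let binary_number := PySem.Int.toBin number
  let ones := PySem.Str.split₀ (PySem.Str.replace binary_number "0" " ")
  if recognizeLoop ones false then true else false

-- ===== PORT B =====
def recognize_alt (number : Int) : Bool :=
  let ones := PySem.Str.split₀ (PySem.Str.replace (PySem.Int.toBin number) "0" " ")
  decide (2 ≤ ones.length) && (PySem.Set.len (PySem.Set.ofList ones) == 1)

-- ===== PRECONDITION & SPEC =====
def Spec_recognize (number : Int) (out : Bool) : Prop := out = recognize_alt number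
instance (number : Int) (out : Bool) : Decidable (Spec_recognize number out) := by unfold Spec_recognize; infer_instance

-- ===== CLAIM (what is proved, stated in full; the proofs are below) =====
def Claim_equal_recognize : Prop := ∀ (number : Int), Dom_recognize number → Spec_recognize number (recognize number)

-- ===== LEMMAS AND PROOFS =====

-- A's loop on a nonempty tail computes "every element of l equals the head a"
theorem recognizeLoop_cons (l : List String) (a : String) (b : Bool) (h : l ≠ []) :
    recognizeLoop (a :: l) b = l.all (· == a) := by
  induction l generalizing a b with
  | nil => exact absurd rfl h
  | cons y t ih =>
      cases t with
      | nil =>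
          simp [recognizeLoop, List.all]
          by_cases hy : a = y
          · simp [hy]
          · simp [hy]; exact fun h' => hy h'.symm
      | cons z u =>
          show (if a == y then recognizeLoop (y :: z :: u) true else false) = _
          by_cases hy : a = y
          · subst hy
            rw [if_pos (by simp), ih a true (by simp)]
            simp
          · rw [if_neg (by simpa using hy)]
            simp [List.all_cons]
            intro h'
            exact absurd h'.symm hy

-- if every element of l equals a, the set of a :: l is the singleton [a]
theorem ofList_cons_all_eq (l : List String) (a : String)
    (h : ∀ x ∈ l, x = a) : PySem.Set.ofList (a :: l) = [a] := by
  rw [PySem.Set.ofList_eq_foldl]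
  have base : PySem.Set.add ([] : PySem.Set String) a = [a] := by
    simp [PySem.Set.add, PySem.Set.contains]
  rw [List.foldl_cons, base]
  induction l with
  | nil => simp
  | cons y t ih =>
      have hy := h y (by simp)
      subst hy
      have : PySem.Set.add ([y] : PySem.Set String) y = [y] := by
        simp [PySem.Set.add, PySem.Set.contains]
      rw [List.foldl_cons, this]
      exact ih (fun x hx => h x (by simp [hx]))

-- cardinality-1 of the token set ↔ "every tail element equals the head"
theorem len_ofList_eq_one (l : List String) (a : String) :
    ((PySem.Set.len (PySem.Set.ofList (a :: l)) == 1) = true) ↔ (∀ x ∈ l, x = a) := by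
  constructor
  · intro h x hx
    have hlen : (PySem.Set.ofList (a :: l)).length = 1 := by
      simpa [PySem.Set.len] using h
    obtain ⟨c, hc⟩ := List.length_eq_one_iff.mp hlen
    have ha : a ∈ PySem.Set.ofList (a :: l) := by
      rw [PySem.Set.mem_ofList]; simp
    have hxm : x ∈ PySem.Set.ofList (a :: l) := by
      rw [PySem.Set.mem_ofList]; simp [hx]
    rw [hc] at ha hxm
    simp at ha hxm
    rw [hxm, ha]
  · intro h
    rw [ofList_cons_all_eq l a h]
    simp [PySem.Set.len]

-- ===== VERDICT (by name: the statement is the Claim_ definition above) =====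
theorem recognize_spec : Claim_equal_recognize := by
  intro number _
  unfold Spec_recognize recognize recognize_alt
  cases hl : PySem.Str.split₀ (PySem.Str.replace (PySem.Int.toBin number) "0" " ") with
  | nil => simp only [hl]; simp [recognizeLoop]
  | cons a t =>
      cases t with
      | nil => simp only [hl]; simp [recognizeLoop]
      | cons y u =>
          simp only [hl]
          rw [recognizeLoop_cons (y :: u) a false (by simp)]
          rw [show ∀ b : Bool, (if b = true then true else false) = b from fun b => by cases b <;> rfl]
          have hlen : (2 : Nat) ≤ (a :: y :: u).length := by simp
          simp only [hlen, decide_true, Bool.true_and]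
          by_cases h : ∀ x ∈ y :: u, x = a
          · rw [(len_ofList_eq_one (y :: u) a).mpr h]
            exact List.all_eq_true.mpr (fun x hx => by simpa using h x hx)
          · have h2 : (PySem.Set.len (PySem.Set.ofList (a :: y :: u)) == 1) = false := by
              rw [Bool.eq_false_iff]
              exact fun hc => h ((len_ofList_eq_one (y :: u) a).mp hc)
            rw [h2, Bool.eq_false_iff]
            intro hall
            exact h (fun x hx => by simpa using List.all_eq_true.mp hall x hx)
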